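-- pv_equiv track=rewrite | github.com/ZeoxD/program-scripts | python/examlast.py | alternating
-- ===== SOURCE A (Python) =====
-- def alternating(lst):
--     count = 0
--     if(lst[0]%2==0):
--         for i in range(len(lst)):
--             a = lst[i]
--
--             if(a%2==0 and i%2==0):
--                 count = count+1
--
--             if (a%2!=0 and i%2!=0):
--                 count = count+1
--
--     if (lst[0]%2!=0):
--         return False
--
--     if (count == len(lst)):
--         return True
--     else:
--         return False
-- ===== SOURCE B (Python) =====
-- def alternating(lst):
--     if lst[0] % 2 != 0:
--         return False
--     return all(x % 2 == 0 for x in lst[::2]) and all(x % 2 != 0 for x in lst[1::2])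
-- ===== Notes on version B (the rewrite author's own statement) =====
-- stated objective: simpler
-- what changed: Replaces A's indexed loop that counts positions whose element parity matches the index parity (then compares the count to len) with a head-parity guard plus two stride-2 slice passes: all elements at even indices are even and all at odd indices are odd.
import Mathlib
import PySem

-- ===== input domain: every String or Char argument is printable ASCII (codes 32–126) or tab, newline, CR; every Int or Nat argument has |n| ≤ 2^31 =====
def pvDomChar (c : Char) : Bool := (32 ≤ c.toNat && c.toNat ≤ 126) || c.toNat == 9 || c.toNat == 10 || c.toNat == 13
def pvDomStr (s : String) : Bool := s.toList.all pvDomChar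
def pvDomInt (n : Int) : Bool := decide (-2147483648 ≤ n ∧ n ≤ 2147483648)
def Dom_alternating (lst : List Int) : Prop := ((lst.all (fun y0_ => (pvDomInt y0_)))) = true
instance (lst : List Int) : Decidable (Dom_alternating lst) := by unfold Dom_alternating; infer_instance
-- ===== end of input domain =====

-- B replaces A's single indexed loop (count index-parity matches, compare to len)
-- by a head guard plus two stride-2 passes; equal return value on every non-empty list.

-- ===== PORT A =====
-- the loop body of A: 'a = lst[i]' is in range for i ∈ range(len(lst)), so pyGetD is exact here
def alternatingStep (lst : List Int) (count : Int) (i : Int) : Int :=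
  let a := PySem.List.pyGetD lst i 0
  let count := if PySem.Int.mod a 2 == 0 && PySem.Int.mod i 2 == 0 then count + 1 else count
  if PySem.Int.mod a 2 != 0 && PySem.Int.mod i 2 != 0 then count + 1 else count

def alternating (lst : List Int) : Bool :=
  match PySem.List.pyGet? lst 0 with
  | none => false  -- lst[0] raises IndexError: excluded by Pre_
  | some h =>
    let count : Int :=
      if PySem.Int.mod h 2 == 0 then
        (PySem.List.pyRange 0 lst.length 1).foldl (alternatingStep lst) 0
      else 0
    if PySem.Int.mod h 2 != 0 then false
    else count == (lst.length : Int)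

-- ===== PORT B =====
-- hand port of the stride-2 slice lst[::2] (nonnegative start, full stop, step 2): exact there
def everyOther : List Int → List Int
  | [] => []
  | [a] => [a]
  | a :: _ :: rest => a :: everyOther rest

def alternating_alt (lst : List Int) : Bool :=
  match PySem.List.pyGet? lst 0 with
  | none => false  -- lst[0] raises IndexError: excluded by Pre_
  | some h =>
    if PySem.Int.mod h 2 != 0 then false
    else (everyOther lst).all (fun x => PySem.Int.mod x 2 == 0)
         && (everyOther lst.tail).all (fun x => PySem.Int.mod x 2 != 0)

-- ===== PRECONDITION & SPEC =====
-- A evaluates lst[0], which raises IndexError on the empty list (B raises there too)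
def Pre_alternating (lst : List Int) : Prop := lst ≠ []
instance (lst : List Int) : Decidable (Pre_alternating lst) := by unfold Pre_alternating; infer_instance

def pvWitness_alternating : List Int := ([2, 3, 4])

def Spec_alternating (lst : List Int) (out : Bool) : Prop := out = alternating_alt lst
instance (lst : List Int) (out : Bool) : Decidable (Spec_alternating lst out) := by unfold Spec_alternating; infer_instance

-- ===== CLAIM (what is proved, stated in full; the proofs are below) =====
def Claim_equal_alternating : Prop := ∀ (lst : List Int), Dom_alternating lst → Pre_alternating lst → Spec_alternating lst (alternating lst)

-- ===== LEMMAS AND PROOFS =====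

-- reference spec: list alternates parity, starting with the parity of s
def okFrom : List Int → Int → Bool
  | [], _ => true
  | a :: t, s => (PySem.Int.mod a 2 == PySem.Int.mod s 2) && okFrom t (s + 1)

-- number of index-parity matches starting at index s
def cnt : List Int → Int → Int
  | [], _ => 0
  | a :: t, s => (if PySem.Int.mod a 2 == PySem.Int.mod s 2 then 1 else 0) + cnt t (s + 1)

theorem pymod2 (a : Int) : PySem.Int.mod a 2 = a % 2 := by
  simp [PySem.Int.mod, Int.fmod_eq_emod]

theorem step_eq (lst : List Int) (c i : Int) (a : Int) (h : PySem.List.pyGetD lst i 0 = a) :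
    alternatingStep lst c i = c + (if PySem.Int.mod a 2 == PySem.Int.mod i 2 then 1 else 0) := by
  simp only [alternatingStep, h, pymod2]
  rcases Int.emod_two_eq a with ha | ha <;> rcases Int.emod_two_eq i with hi | hi <;>
    simp [ha, hi]

-- fold of A's loop body over enumerate = c + cnt, provided each enumerated pair carries lst's element
theorem foldl_enum_cnt (lst : List Int) :
    ∀ (l : List Int) (s c : Int),
      (∀ k : Nat, (hk : k < l.length) → PySem.List.pyGetD lst (s + k) 0 = l[k]) →
      (PySem.List.enumerate l s).foldl (fun acc (p : Int × Int) => alternatingStep lst acc p.1) c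
        = c + cnt l s := by
  intro l
  induction l with
  | nil => intro s c _; simp [PySem.List.enumerate_nil, cnt]
  | cons a t ih =>
    intro s c hget
    have h0 : PySem.List.pyGetD lst s 0 = a := by
      have := hget 0 (by simp)
      simpa using this
    rw [PySem.List.enumerate_cons]
    simp only [List.foldl_cons]
    rw [step_eq lst c s a h0]
    rw [ih (s + 1) _ (by
      intro k hk
      have := hget (k + 1) (by simpa using Nat.succ_lt_succ hk)
      have harg : s + 1 + (k : Int) = s + ((k : Nat) + 1 : Nat) := by push_cast; ring
      rw [harg, this]; simp)]
    simp [cnt]; ring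

theorem cnt_nonneg : ∀ (l : List Int) (s : Int), 0 ≤ cnt l s := by
  intro l
  induction l with
  | nil => intro s; simp [cnt]
  | cons a t ih => intro s; have := ih (s + 1); simp [cnt]; split <;> omega

theorem cnt_le_length : ∀ (l : List Int) (s : Int), cnt l s ≤ l.length := by
  intro l
  induction l with
  | nil => intro s; simp [cnt]
  | cons a t ih =>
    intro s; have := ih (s + 1); simp [cnt]; split <;> omega

theorem cnt_eq_length_iff : ∀ (l : List Int) (s : Int), (cnt l s = l.length) ↔ okFrom l s = true := by
  intro l
  induction l with
  | nil => intro s; simp [cnt, okFrom]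
  | cons a t ih =>
    intro s
    have h1 := cnt_le_length t (s + 1)
    have h2 := cnt_nonneg t (s + 1)
    simp only [cnt, okFrom, List.length_cons, Bool.and_eq_true, beq_iff_eq]
    rw [← ih (s + 1)]
    split <;> rename_i hcond
    · constructor
      · intro h; exact ⟨by simpa using hcond, by push_cast at h ⊢; omega⟩
      · intro ⟨_, h⟩; push_cast; omega
    · constructor
      · intro h; exfalso; push_cast at h; omega
      · intro ⟨h, _⟩; exact absurd (by simpa using h) hcond

-- okFrom only depends on the parity of s
theorem okFrom_add_two : ∀ (l : List Int) (s : Int), okFrom l (s + 2) = okFrom l s := by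
  intro l
  induction l with
  | nil => intro s; simp [okFrom]
  | cons a t ih =>
    intro s
    have hm : PySem.Int.mod (s + 2) 2 = PySem.Int.mod s 2 := by rw [pymod2, pymod2]; omega
    have := ih (s + 1)
    simp only [okFrom, hm]
    rw [show s + 2 + 1 = (s + 1) + 2 by ring, this]

theorem everyOther_cons (b : Int) (rest : List Int) :
    everyOther (b :: rest) = b :: everyOther rest.tail := by
  cases rest <;> simp [everyOther]

-- B's two stride-2 passes compute okFrom from index parity 0
theorem alt_body_eq_okFrom : ∀ (l : List Int),
    ((everyOther l).all (fun x => PySem.Int.mod x 2 == 0)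
      && (everyOther l.tail).all (fun x => PySem.Int.mod x 2 != 0)) = okFrom l 0 := by
  intro l
  induction l using everyOther.induct with
  | case1 => simp [everyOther, okFrom]
  | case2 a => simp [everyOther, okFrom]
  | case3 a b rest ih =>
    have hok : okFrom rest (0 + 1 + 1) = okFrom rest 0 := by
      simpa using okFrom_add_two rest 0
    simp only [everyOther, List.tail_cons, everyOther_cons, List.all_cons, okFrom, hok,
      pymod2] at *
    rcases Int.emod_two_eq a with ha | ha <;> rcases Int.emod_two_eq b with hb | hb <;>
      · simp [ha, hb] at ih ⊢
        try exact ih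

-- A's fold over range(len(lst)) equals cnt lst 0
theorem foldA_eq_cnt (lst : List Int) :
    (PySem.List.pyRange 0 lst.length 1).foldl (alternatingStep lst) 0 = cnt lst 0 := by
  have henum := PySem.List.enumerate_eq_map_pyRange (xs := lst) (d := (0:Int))
  have hfold :
      (PySem.List.enumerate lst 0).foldl (fun acc (p : Int × Int) => alternatingStep lst acc p.1) 0
        = (PySem.List.pyRange 0 lst.length 1).foldl (alternatingStep lst) 0 := by
    rw [henum, List.foldl_map]
    simp
  rw [← hfold]
  have := foldl_enum_cnt lst lst 0 0 (by
    intro k hk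
    simp [PySem.List.pyGetD, PySem.List.pyGet?, PySem.List.pyIdx?, hk])
  simpa using this

-- ===== VERDICT (by name: the statement is the Claim_ definition above) =====
theorem alternating_spec : Claim_equal_alternating := by
  intro lst _ hpre
  unfold Spec_alternating alternating alternating_alt
  cases lst with
  | nil => exact absurd rfl hpre
  | cons h t =>
    have hget : PySem.List.pyGet? (h :: t) 0 = some h := by
      simp [PySem.List.pyGet?, PySem.List.pyIdx?]
    rw [hget]
    simp only
    rw [alt_body_eq_okFrom (h :: t)]
    rcases Int.emod_two_eq h with hm | hm
    · have hmz : PySem.Int.mod h 2 = 0 := by rw [pymod2]; exact hm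
      simp only [hmz, beq_self_eq_true, if_true, bne_self_eq_false, Bool.false_eq_true,
        if_false, foldA_eq_cnt (h :: t)]
      cases hok : okFrom (h :: t) 0 with
      | true =>
        have : cnt (h :: t) 0 = ((h :: t).length : Int) := (cnt_eq_length_iff (h :: t) 0).mpr hok
        simp [this]
      | false =>
        have hne : ¬ (cnt (h :: t) 0 = ((h :: t).length : Int)) := by
          intro hc
          rw [(cnt_eq_length_iff (h :: t) 0).mp hc] at hok
          simp at hok
        simp only [beq_eq_false_iff_ne, ne_eq]
        push_cast at hne ⊢
        exact hne
    · have hmz : PySem.Int.mod h 2 = 1 := by rw [pymod2]; exact hm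
      simp [hm]
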